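-- pv_equiv track=rewrite | github.com/ST3LL/CHARPAK_S6-UE_Cryptographie | analyse_frequentielle.py | frequence_abc
-- ===== SOURCE A (Python) =====
-- import string
--
-- def frequence_abc(mot) :
--     """
--     Prend en argument une chaîne de caractères et renvoie un tuple composé
--     du nombre d'occurance max et une liste des lettres ayant l'occurance
--     la plus élevée (seulement pour des chaînes de caractères comprenant
--     les 26 lettres de l'alphabet français).
--
--     Entrée:
--         (str)
--     Sortie:
--         (tuple) => (int, list)
--     Test:
--         >>> mot = "anticonstitutionnellement"
--         >>> frequence_abc(mot) == (5, ['n', 't'])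
--         True
--     """
--     freq = [0, 0, 0, 0, 0, 0, 0, 0, 0, 0, 0, 0, 0, 0, 0, 0, 0, 0, 0, 0, 0, 0, 0, 0, 0, 0]
--     for lettre in mot :
--         if lettre in string.ascii_lowercase :
--             freq[ord(lettre) - ord('a')] += 1
--
--     sup = [i for i, j in enumerate(freq) if j == (max(freq))]
--     n_freq = []
--     for k in sup :
--         n_freq.append(string.ascii_lowercase[k])
--     return max(freq), n_freq
-- ===== SOURCE B (Python) =====
-- import string
--
-- def frequence_abc(mot):
--     freq = [0] * 26
--     for lettre in mot:
--         if 'a' <= lettre <= 'z':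
--             freq[ord(lettre) - ord('a')] += 1
--     # group letters by their count, alphabet order keeps each bucket alphabetical
--     groups = {}
--     for i, c in enumerate(freq):
--         groups[c] = groups.get(c, []) + [string.ascii_lowercase[i]]
--     m = max(groups)
--     return m, groups[m]
-- ===== Notes on version B (the rewrite author's own statement) =====
-- stated objective: alternative
-- what changed: Selection phase replaced: instead of computing max(freq) and filtering the count array for indices attaining it, B groups the 26 letters into a dict keyed by their count (alphabet order keeps buckets alphabetical) and returns the maximal key with its bucket.
import Mathlib
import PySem

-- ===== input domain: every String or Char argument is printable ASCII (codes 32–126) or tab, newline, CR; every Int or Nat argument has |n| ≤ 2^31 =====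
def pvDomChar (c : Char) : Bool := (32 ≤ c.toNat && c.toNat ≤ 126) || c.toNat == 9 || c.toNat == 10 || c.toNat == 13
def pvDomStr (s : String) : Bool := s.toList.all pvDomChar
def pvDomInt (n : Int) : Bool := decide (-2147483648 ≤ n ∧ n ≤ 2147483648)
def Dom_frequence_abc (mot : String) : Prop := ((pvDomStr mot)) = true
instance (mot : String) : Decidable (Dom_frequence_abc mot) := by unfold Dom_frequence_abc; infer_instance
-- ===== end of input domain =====

-- B replaces A's "max then filter the count array" by grouping the letters by count in a
-- dictionary and returning its top group (objective: alternative decomposition, same cost).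

-- ===== PORT A =====
-- string.ascii_lowercase, as the characters A's membership test scans
def pvAzChars : List Char :=
  ['a','b','c','d','e','f','g','h','i','j','k','l','m','n','o','p','q','r','s','t','u','v','w','x','y','z']
-- string.ascii_lowercase[k] yields a 1-char str in Python, hence a String-valued table for indexing
def pvAzStrs : List String :=
  ["a","b","c","d","e","f","g","h","i","j","k","l","m","n","o","p","q","r","s","t","u","v","w","x","y","z"]
def pvZeros : List Int :=
  [0, 0, 0, 0, 0, 0, 0, 0, 0, 0, 0, 0, 0, 0, 0, 0, 0, 0, 0, 0, 0, 0, 0, 0, 0, 0]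

-- A's counting loop; 'lettre in string.ascii_lowercase' for a 1-char lettre is membership in its
-- characters; under that guard ord(lettre)-ord('a') is in 0..25, so Nat subtraction and List.set
-- are exact here
def pvCountA (mot : String) : List Int :=
  mot.toList.foldl
    (fun f c => if pvAzChars.contains c then f.set (c.toNat - 97) (f.getD (c.toNat - 97) 0 + 1) else f)
    pvZeros

-- max(freq), sup and the appending loop of A; max over the 26-element freq never raises
def frequence_abc (mot : String) : Int × List String :=
  ((PySem.List.max? (pvCountA mot) (fun x => x)).getD 0,
   (((PySem.List.enumerate (pvCountA mot)).filter
       (fun p => p.2 == (PySem.List.max? (pvCountA mot) (fun x => x)).getD 0)).map (fun p => p.1)).foldl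
     (fun acc k => acc ++ [PySem.List.pyGetD pvAzStrs k ""]) [])

-- ===== PORT B =====
-- B's counting loop ('a' <= lettre <= 'z' is the chained char comparison)
def pvCountB (mot : String) : List Int :=
  mot.toList.foldl
    (fun f c => if 'a' ≤ c ∧ c ≤ 'z' then f.set (c.toNat - 97) (f.getD (c.toNat - 97) 0 + 1) else f)
    pvZeros

-- groups[c] = groups.get(c, []) + [letters[i]]
def pvGroups (mot : String) : PySem.Dict Int (List String) :=
  (PySem.List.enumerate (pvCountB mot)).foldl
    (fun d p => d.insert p.2 (d.getD p.2 [] ++ [PySem.List.pyGetD pvAzStrs p.1 ""]))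
    PySem.Dict.empty

-- m = max(groups) iterates the keys; groups is never empty (26 entries fed in)
def frequence_abc_alt (mot : String) : Int × List String :=
  ((PySem.List.max? (pvGroups mot).keys (fun x => x)).getD 0,
   (pvGroups mot).getD ((PySem.List.max? (pvGroups mot).keys (fun x => x)).getD 0) [])

-- ===== PRECONDITION & SPEC =====
def Spec_frequence_abc (mot : String) (out : Int × List String) : Prop := out = frequence_abc_alt mot
instance (mot : String) (out : Int × List String) : Decidable (Spec_frequence_abc mot out) := by unfold Spec_frequence_abc; infer_instance

-- ===== CLAIM (what is proved, stated in full; the proofs are below) =====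
def Claim_equal_frequence_abc : Prop := ∀ (mot : String), Dom_frequence_abc mot → Spec_frequence_abc mot (frequence_abc mot)

-- ===== LEMMAS AND PROOFS =====

theorem pv_mem_az_iff (c : Char) : c ∈ pvAzChars ↔ ('a' ≤ c ∧ c ≤ 'z') := by
  constructor
  · intro h
    fin_cases h <;> exact ⟨by decide, by decide⟩
  · rintro ⟨h1, h2⟩
    rw [Char.le_def, UInt32.le_iff_toNat_le] at h1 h2
    have hofn : ∀ n : Nat, 97 ≤ n → n ≤ 122 → Char.ofNat n ∈ pvAzChars := by
      intro n hn1 hn2; interval_cases n <;> decide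
    have := hofn c.toNat h1 h2
    rwa [Char.ofNat_toNat] at this

theorem pv_count_eq (mot : String) : pvCountA mot = pvCountB mot := by
  unfold pvCountA pvCountB
  congr 1
  funext f c
  by_cases h : 'a' ≤ c ∧ c ≤ 'z'
  · rw [if_pos h, if_pos (by simpa using (pv_mem_az_iff c).mpr h)]
  · rw [if_neg h, if_neg (by simpa using fun hm => h ((pv_mem_az_iff c).mp hm))]

theorem pv_count_length (mot : String) : (pvCountB mot).length = 26 := by
  unfold pvCountB
  generalize hz : pvZeros = z
  have hlen : z.length = 26 := by rw [← hz]; rfl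
  clear hz
  induction mot.toList generalizing z with
  | nil => simpa using hlen
  | cons c t ih =>
    rw [List.foldl_cons]
    split
    · exact ih _ (by simpa using hlen)
    · exact ih _ hlen

-- the grouping loop, characterised: bucket v holds (in order) g x for every x with key x = v
theorem pv_getD_groupfold :
    ∀ (l : List (Int × Int)) (d : PySem.Dict Int (List String)) (v : Int),
      (l.foldl (fun d p => d.insert p.2 (d.getD p.2 [] ++ [PySem.List.pyGetD pvAzStrs p.1 ""])) d).getD v [] =
        d.getD v [] ++ (l.filter (fun p => p.2 == v)).map (fun p => PySem.List.pyGetD pvAzStrs p.1 "") := by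
  intro l
  induction l with
  | nil => intro d v; simp
  | cons x t ih =>
    intro d v
    rw [List.foldl_cons, ih, PySem.Dict.getD_insert, List.filter_cons]
    by_cases h : v = x.2
    · simp [h, List.append_assoc]
    · have h' : (x.2 == v) = false := beq_eq_false_iff_ne.mpr (Ne.symm h)
      simp [h, h']

theorem pv_max_getD_eq (xs ys : List Int) (hx : xs ≠ [])
    (hmem : ∀ a, a ∈ xs ↔ a ∈ ys) :
    (PySem.List.max? xs (fun x => x)).getD 0 = (PySem.List.max? ys (fun x => x)).getD 0 := by
  obtain ⟨a, ha⟩ := List.exists_mem_of_ne_nil xs hx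
  have hy : ys ≠ [] := List.ne_nil_of_mem ((hmem a).mp ha)
  obtain ⟨ma, hma⟩ : ∃ m, PySem.List.max? xs (fun x => x) = some m := by
    cases h : PySem.List.max? xs (fun x => x) with
    | none => exact absurd ((PySem.List.max?_eq_none_iff _ _).mp h) hx
    | some m => exact ⟨m, rfl⟩
  obtain ⟨mb, hmb⟩ : ∃ m, PySem.List.max? ys (fun x => x) = some m := by
    cases h : PySem.List.max? ys (fun x => x) with
    | none => exact absurd ((PySem.List.max?_eq_none_iff _ _).mp h) hy
    | some m => exact ⟨m, rfl⟩
  rw [hma, hmb]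
  have h1 : ma ≤ mb := PySem.List.max?_isMax hmb ma ((hmem ma).mp (PySem.List.max?_mem hma))
  have h2 : mb ≤ ma := PySem.List.max?_isMax hma mb ((hmem mb).mpr (PySem.List.max?_mem hmb))
  simpa using le_antisymm h1 h2

theorem pv_keys_groups (mot : String) : (pvGroups mot).keys = PySem.Set.ofList (pvCountB mot) := by
  unfold pvGroups
  rw [PySem.Dict.keys_foldl_insert_key]
  simp [PySem.List.map_snd_enumerate, PySem.Set.update, PySem.Set.ofList_eq_foldl, PySem.Dict.keys_empty]

theorem pv_max_eq (mot : String) :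
    (PySem.List.max? (pvCountB mot) (fun x => x)).getD 0 =
      (PySem.List.max? (pvGroups mot).keys (fun x => x)).getD 0 := by
  have hne : pvCountB mot ≠ [] := by
    intro h; have := pv_count_length mot; rw [h] at this; simp at this
  refine pv_max_getD_eq _ _ hne ?_
  intro a
  rw [pv_keys_groups]
  exact (PySem.Set.mem_ofList _ _).symm

theorem pv_flatten_singleton {α β : Type} (f : α → β) :
    ∀ (l : List α), (l.map (fun x => [f x])).flatten = l.map f := by
  intro l; induction l with
  | nil => rfl
  | cons x t ih => simp [ih]

-- ===== VERDICT (by name: the statement is the Claim_ definition above) =====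
theorem frequence_abc_spec : Claim_equal_frequence_abc := by
  intro mot _
  unfold Spec_frequence_abc frequence_abc frequence_abc_alt
  rw [pv_count_eq, pv_max_eq]
  refine Prod.ext rfl ?_
  show _ = (pvGroups mot).getD _ []
  rw [show pvGroups mot =
        (PySem.List.enumerate (pvCountB mot)).foldl
          (fun d p => d.insert p.2 (d.getD p.2 [] ++ [PySem.List.pyGetD pvAzStrs p.1 ""]))
          PySem.Dict.empty from rfl,
      pv_getD_groupfold]
  simp [List.map_map, Function.comp_def, pv_flatten_singleton]
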